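-- pv_equiv track=rewrite | github.com/lalala2726/medicine-agent | app/agent/client/domain/router/gateway_node.py | _normalize_route_targets
-- ===== SOURCE A (Python) =====
-- _ALLOWED_GATEWAY_TARGETS: tuple[str, ...] = (
--     "chat_agent",
--     "order_agent",
--     "product_agent",
--     "after_sale_agent",
-- )
--
-- def _normalize_route_targets(route_targets: list[str]) -> list[str]:
--     """规范化 client gateway 目标数组。"""
--
--     normalized: list[str] = []
--     for raw_target in route_targets:
--         target = str(raw_target or "").strip()
--         if not target:
--             return []
--         if target not in _ALLOWED_GATEWAY_TARGETS:
--             return []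
--         if target in normalized:
--             continue
--         normalized.append(target)
--
--     if len(normalized) != 1:
--         return []
--     return normalized
-- ===== SOURCE B (Python) =====
-- _ALLOWED_GATEWAY_TARGETS: tuple[str, ...] = (
--     "chat_agent",
--     "order_agent",
--     "product_agent",
--     "after_sale_agent",
-- )
--
-- def _normalize_route_targets(route_targets: list[str]) -> list[str]:
--     distinct = {str(t or "").strip() for t in route_targets}
--     if len(distinct) != 1:
--         return []
--     single = distinct.pop()
--     if not single or single not in _ALLOWED_GATEWAY_TARGETS:
--         return []
--     return [single]
-- ===== Notes on version B (the rewrite author's own statement) =====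
-- stated objective: simpler
-- what changed: B builds the set of distinct normalized targets in one comprehension and validates the single survivor once, replacing A's per-element loop with early returns, an ordered accumulator and per-element membership tests.
import Mathlib
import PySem

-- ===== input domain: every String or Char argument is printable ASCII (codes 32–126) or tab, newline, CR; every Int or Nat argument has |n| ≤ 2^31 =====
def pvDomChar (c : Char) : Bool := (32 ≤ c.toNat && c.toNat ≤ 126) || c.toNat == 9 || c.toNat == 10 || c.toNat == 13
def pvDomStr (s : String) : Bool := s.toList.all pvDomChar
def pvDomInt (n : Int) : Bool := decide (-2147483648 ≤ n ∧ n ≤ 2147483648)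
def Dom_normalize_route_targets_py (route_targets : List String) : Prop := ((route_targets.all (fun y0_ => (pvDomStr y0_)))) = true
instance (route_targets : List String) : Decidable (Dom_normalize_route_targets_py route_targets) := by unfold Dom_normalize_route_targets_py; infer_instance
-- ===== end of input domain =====

-- B replaces A's per-element loop (early returns + ordered accumulator with a membership scan) by
-- dedup-first via a set comprehension and a single validation of the unique survivor (objective: simpler).

-- module constant _ALLOWED_GATEWAY_TARGETS (shared by both sources)
def pvAllowed : List String :=
  ["chat_agent", "order_agent", "product_agent", "after_sale_agent"]

-- str(raw_target or "").strip() — for a str argument, `raw or ""` is `""` iff raw is empty, str() is identity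
def pvNorm (raw : String) : String :=
  PySem.Str.strip (if raw = "" then "" else raw)

-- ===== PORT A =====
-- the for-loop of A with its early returns, accumulator `normalized`
def pvLoopA : List String → List String → List String
  | [], normalized => if normalized.length ≠ 1 then [] else normalized
  | raw :: rest, normalized =>
    let target := pvNorm raw
    if target = "" then []
    else if target ∉ pvAllowed then []
    else if target ∈ normalized then pvLoopA rest normalized
    else pvLoopA rest (normalized ++ [target])

def normalize_route_targets_py (route_targets : List String) : List String :=
  pvLoopA route_targets []

-- ===== PORT B =====
def normalize_route_targets_py_alt (route_targets : List String) : List String :=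
  let distinct := PySem.Set.ofList (route_targets.map pvNorm)
  if distinct.length ≠ 1 then []
  else
    match distinct with
    | [single] => if single = "" ∨ single ∉ pvAllowed then [] else [single]
    | _ => []

-- ===== PRECONDITION & SPEC =====
def Spec_normalize_route_targets_py (route_targets : List String) (out : List String) : Prop := out = normalize_route_targets_py_alt route_targets
instance (route_targets : List String) (out : List String) : Decidable (Spec_normalize_route_targets_py route_targets out) := by unfold Spec_normalize_route_targets_py; infer_instance

-- ===== CLAIM (what is proved, stated in full; the proofs are below) =====
def Claim_equal_normalize_route_targets_py : Prop := ∀ (route_targets : List String), Dom_normalize_route_targets_py route_targets → Spec_normalize_route_targets_py route_targets (normalize_route_targets_py route_targets)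

-- ===== LEMMAS AND PROOFS =====

-- what B does to the final distinct list
def pvFinalize (l : List String) : List String :=
  match l with
  | [single] => if single = "" ∨ single ∉ pvAllowed then [] else [single]
  | _ => []

theorem pv_alt_eq_finalize (rt : List String) :
    normalize_route_targets_py_alt rt = pvFinalize (PySem.Set.ofList (rt.map pvNorm)) := by
  unfold normalize_route_targets_py_alt pvFinalize
  cases h : PySem.Set.ofList (rt.map pvNorm) with
  | nil => simp
  | cons a t => cases t <;> simp

theorem pv_mem_foldl_add {x : String} (l : List String) :
    ∀ s : List String, x ∈ s → x ∈ List.foldl PySem.Set.add s l := by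
  induction l with
  | nil => intro s h; simpa using h
  | cons a t ih =>
    intro s h
    exact ih (PySem.Set.add s a) ((PySem.Set.mem_add _ _ _).2 (Or.inl h))

theorem pv_add_of_mem {s : List String} {x : String} (h : x ∈ s) :
    PySem.Set.add s x = s := by
  simp [PySem.Set.add, h]

theorem pv_add_of_not_mem {s : List String} {x : String} (h : x ∉ s) :
    PySem.Set.add s x = s ++ [x] := by
  simp [PySem.Set.add, h]

-- core invariant: the loop with a good accumulator equals finalize of folding add over the rest
theorem pv_key (rest : List String) :
    ∀ normalized : List String,
      (∀ x ∈ normalized, x ≠ "" ∧ x ∈ pvAllowed) →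
      pvLoopA rest normalized = pvFinalize (List.foldl PySem.Set.add normalized (rest.map pvNorm)) := by
  induction rest with
  | nil =>
    intro n hn
    match n with
    | [] => rfl
    | [s] =>
      obtain ⟨h1, h2⟩ := hn s (by simp)
      simp [pvLoopA, pvFinalize, h1, h2]
    | a :: b :: t => simp [pvLoopA, pvFinalize]
  | cons raw rest ih =>
    intro n hn
    by_cases hbad : pvNorm raw = "" ∨ pvNorm raw ∉ pvAllowed
    · -- A returns [] immediately; B's final set contains the bad element, so finalize gives []
      have hnm : pvNorm raw ∉ n := by
        intro hmem
        rcases hbad with h | h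
        · exact (hn _ hmem).1 h
        · exact h (hn _ hmem).2
      have hmemf : pvNorm raw ∈ List.foldl PySem.Set.add (PySem.Set.add n (pvNorm raw)) (rest.map pvNorm) :=
        pv_mem_foldl_add _ _ ((PySem.Set.mem_add _ _ _).2 (Or.inr rfl))
      have hlhs : pvLoopA (raw :: rest) n = [] := by
        rcases hbad with h | h
        · simp [pvLoopA, h]
        · simp [pvLoopA, h]
      rw [hlhs]
      simp only [List.map_cons, List.foldl_cons]
      cases hfin : List.foldl PySem.Set.add (PySem.Set.add n (pvNorm raw)) (rest.map pvNorm) with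
      | nil => simp [pvFinalize]
      | cons a t =>
        cases t with
        | nil =>
          have : pvNorm raw = a := by
            rw [hfin] at hmemf; simpa using hmemf
          rcases hbad with h | h
          · simp [pvFinalize, ← this, h]
          · simp [pvFinalize, ← this, h]
        | cons b t' => simp [pvFinalize]
    · push Not at hbad
      obtain ⟨h1, h2⟩ := hbad
      by_cases hmem : pvNorm raw ∈ n
      · have : pvLoopA (raw :: rest) n = pvLoopA rest n := by
          simp [pvLoopA, h1, h2, hmem]
        rw [this, ih n hn]
        simp only [List.map_cons, List.foldl_cons, pv_add_of_mem hmem]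
      · have : pvLoopA (raw :: rest) n = pvLoopA rest (n ++ [pvNorm raw]) := by
          simp [pvLoopA, h1, h2, hmem]
        rw [this, ih (n ++ [pvNorm raw]) ?hgood]
        · simp only [List.map_cons, List.foldl_cons, pv_add_of_not_mem hmem]
        case hgood =>
          intro x hx
          rcases List.mem_append.1 hx with hx | hx
          · exact hn x hx
          · simp at hx; subst hx; exact ⟨h1, h2⟩

-- ===== VERDICT (by name: the statement is the Claim_ definition above) =====
theorem normalize_route_targets_py_spec : Claim_equal_normalize_route_targets_py := by
  intro rt _
  unfold Spec_normalize_route_targets_py normalize_route_targets_py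
  rw [pv_alt_eq_finalize, PySem.Set.ofList_eq_foldl]
  exact pv_key rt [] (by simp)
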